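-- pv_equiv track=rewrite | github.com/softdevca/styx | implementations/styx-py/styx/lexer.py | _dedent_heredoc
-- ===== SOURCE A (Python) =====
-- def _dedent_heredoc(content: str, indent_len: int) -> str:
--     """Strip up to indent_len whitespace characters from the start of each line."""
--     lines = content.split("\n")
--     result = []
--     for line in lines:
--         stripped = 0
--         for ch in line:
--             if stripped >= indent_len:
--                 break
--             if ch in (" ", "\t"):
--                 stripped += 1
--             else:
--                 break
--         result.append(line[stripped:])
--     return "\n".join(result)
-- ===== SOURCE B (Python) =====
-- def _dedent_heredoc(content: str, indent_len: int) -> str: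
--     """Strip up to indent_len whitespace characters from the start of each line."""
--     out = []
--     skipped = 0
--     skipping = True
--     for ch in content:
--         if ch == "\n":
--             out.append(ch)
--             skipped = 0
--             skipping = True
--         elif skipping and ch in " \t" and skipped < indent_len:
--             skipped += 1
--         else:
--             skipping = False
--             out.append(ch)
--     return "".join(out)
-- ===== Notes on version B (the rewrite author's own statement) =====
-- stated objective: alternative
-- what changed: Replaces split-into-lines / per-line count-and-slice / join with a single streaming pass over the whole string: a small state machine (skipping flag plus a per-line skip counter reset at each newline) that emits characters directly, never materialising the line list or slicing.
import Mathlib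
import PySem

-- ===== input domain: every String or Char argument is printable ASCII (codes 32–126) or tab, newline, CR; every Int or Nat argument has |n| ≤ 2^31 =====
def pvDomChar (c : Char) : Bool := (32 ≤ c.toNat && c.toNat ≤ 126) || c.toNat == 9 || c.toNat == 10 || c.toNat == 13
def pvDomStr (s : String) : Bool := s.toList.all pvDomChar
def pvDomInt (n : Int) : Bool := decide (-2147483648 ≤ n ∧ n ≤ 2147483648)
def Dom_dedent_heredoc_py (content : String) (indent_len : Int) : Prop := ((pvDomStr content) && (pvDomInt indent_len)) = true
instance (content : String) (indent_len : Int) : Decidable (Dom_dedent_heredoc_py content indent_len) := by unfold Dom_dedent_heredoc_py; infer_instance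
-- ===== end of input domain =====

-- B replaces A's split-lines / per-line count-and-slice / join pipeline by one streaming pass
-- over the characters with a per-line skip state; objective: alternative (same asymptotic cost).

-- ===== PORT A =====
-- A's inner 'for ch in line' loop, carrying the 'stripped' counter
def pvStripLoop (line : List Char) (indent_len : Int) (stripped : Nat) : Nat :=
  match line with
  | [] => stripped
  | ch :: rest =>
    if (stripped : Int) ≥ indent_len then stripped
    else if ch = ' ' ∨ ch = '\t' then pvStripLoop rest indent_len (stripped + 1)
    else stripped

def dedent_heredoc_py (content : String) (indent_len : Int) : String :=
  let lines : List String := ((PySem.Str.split? content "\n").getD [])  -- sep "\n" ≠ "": split? is always some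
  let result := lines.foldl (fun acc line =>
    let stripped := pvStripLoop line.toList indent_len 0
    acc ++ [PySem.Str.slice line (some (stripped : Int)) none]) []
  PySem.Str.join "\n" result

-- ===== PORT B =====
-- B's 'for ch in content' streaming loop: state = (skipped counter, skipping flag),
-- the emitted characters are the result of the recursion
def pvStream (indent_len : Int) (cs : List Char) (skipped : Nat) (skipping : Bool) : List Char :=
  match cs with
  | [] => []
  | ch :: rest =>
    if ch = '\n' then ch :: pvStream indent_len rest 0 true
    else if skipping ∧ (ch = ' ' ∨ ch = '\t') ∧ (skipped : Int) < indent_len then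
      pvStream indent_len rest (skipped + 1) skipping
    else ch :: pvStream indent_len rest skipped false

def dedent_heredoc_py_alt (content : String) (indent_len : Int) : String :=
  String.ofList (pvStream indent_len content.toList 0 true)

-- ===== PRECONDITION & SPEC =====
def Spec_dedent_heredoc_py (content : String) (indent_len : Int) (out : String) : Prop := out = dedent_heredoc_py_alt content indent_len
instance (content : String) (indent_len : Int) (out : String) : Decidable (Spec_dedent_heredoc_py content indent_len out) := by unfold Spec_dedent_heredoc_py; infer_instance

-- ===== CLAIM =====
def Claim_equal_dedent_heredoc_py : Prop := ∀ (content : String) (indent_len : Int), Dom_dedent_heredoc_py content indent_len → Spec_dedent_heredoc_py content indent_len (dedent_heredoc_py content indent_len)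

-- ===== LEMMAS AND PROOFS =====

-- structural reference for PySem.Chars.splitOn s ['\n']
def pvSplit : List Char → List (List Char)
  | [] => [[]]
  | c :: cs => if c = '\n' then [] :: pvSplit cs else (c :: (pvSplit cs).headI) :: (pvSplit cs).tail

theorem pvSplit_ne_nil (cs : List Char) : pvSplit cs ≠ [] := by
  cases cs with
  | nil => simp [pvSplit]
  | cons c cs => unfold pvSplit; split <;> simp

theorem pvSplit_headI_tail (cs : List Char) : (pvSplit cs).headI :: (pvSplit cs).tail = pvSplit cs := by
  cases h : pvSplit cs with
  | nil => exact absurd h (pvSplit_ne_nil cs)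
  | cons a t => rfl

theorem splitOn_go_eq (fuel : Nat) : ∀ (l cur : List Char) (accs : List (List Char)),
    l.length ≤ fuel →
    PySem.Chars.splitOn.go ['\n'] fuel l cur accs =
      accs.reverse ++ (cur.reverse ++ (pvSplit l).headI) :: (pvSplit l).tail := by
  induction fuel with
  | zero =>
    intro l cur accs hl
    have hl0 : l = [] := List.length_eq_zero_iff.mp (Nat.le_zero.mp hl)
    subst hl0
    rw [PySem.Chars.splitOn.go]
    simp [pvSplit]
  | succ fuel ih =>
    intro l cur accs hl
    cases l with
    | nil =>
      rw [PySem.Chars.splitOn.go]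
      · simp [pvSplit]
      · omega
    | cons c rest =>
      rw [PySem.Chars.splitOn.go]
      by_cases hc : c = '\n'
      · have hpre : List.isPrefixOf ['\n'] (c :: rest) = true := by simp [hc]
        simp only [hpre, if_true, List.length_singleton, List.drop_succ_cons, List.drop_zero]
        rw [ih rest [] (cur.reverse :: accs) (by simp at hl ⊢; omega)]
        simp [pvSplit, hc, pvSplit_headI_tail]
      · have hpre : List.isPrefixOf ['\n'] (c :: rest) = false := by
          simp [List.isPrefixOf]; exact fun h => absurd h.symm hc
        simp only [hpre, Bool.false_eq_true, if_false]
        rw [ih rest (c :: cur) accs (by simp at hl ⊢; omega)]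
        simp [pvSplit, hc]

theorem splitOn_eq_pvSplit (cs : List Char) : PySem.Chars.splitOn cs ['\n'] = pvSplit cs := by
  unfold PySem.Chars.splitOn
  rw [splitOn_go_eq (cs.length + 1) cs [] [] (by omega)]
  simp [pvSplit_headI_tail]

theorem pvStripLoop_le (il : Int) : ∀ (l : List Char) (s : Nat), s ≤ pvStripLoop l il s := by
  intro l
  induction l with
  | nil => intro s; simp [pvStripLoop]
  | cons c cs ih =>
    intro s
    unfold pvStripLoop
    split
    · exact le_refl s
    · split
      · exact Nat.le_trans (Nat.le_succ s) (ih (s + 1))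
      · exact le_refl s

theorem pvStream_noskip (il : Int) (line : List Char) (h : '\n' ∉ line) :
    ∀ (k : Nat) (rest : List Char),
    pvStream il (line ++ rest) k false = line ++ pvStream il rest k false := by
  induction line with
  | nil => intro k rest; simp
  | cons c cs ih =>
    intro k rest
    have hcm : '\n' ∉ cs := fun hm => h (List.mem_cons_of_mem c hm)
    simp only [List.cons_append, pvStream]
    rw [if_neg (by exact fun h' => h (h' ▸ List.mem_cons_self))]
    rw [if_neg (by simp)]
    simp [ih hcm k rest]

theorem pvStream_newline (il : Int) (c : Char) (cs : List Char) (k : Nat) (b : Bool)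
    (hc : c = '\n') : pvStream il (c :: cs) k b = c :: pvStream il cs 0 true := by
  simp [pvStream, hc]

theorem pvStream_reset (il : Int) (rest : List Char) (h : rest.head? = some '\n' ∨ rest = []) :
    ∀ (k : Nat) (b : Bool), pvStream il rest k b = pvStream il rest 0 true := by
  intro k b
  cases rest with
  | nil => simp [pvStream]
  | cons c cs =>
    have hc : c = '\n' := by
      rcases h with h | h
      · simpa using h
      · exact absurd h (List.cons_ne_nil c cs)
    simp [pvStream, hc]

theorem pvStream_line (il : Int) (line : List Char) (h : '\n' ∉ line) :
    ∀ (k : Nat) (rest : List Char), rest.head? = some '\n' ∨ rest = [] →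
    pvStream il (line ++ rest) k true =
      line.drop (pvStripLoop line il k - k) ++ pvStream il rest 0 true := by
  induction line with
  | nil =>
    intro k rest hrest
    simp only [List.nil_append, pvStripLoop, Nat.sub_self, List.drop_zero]
    exact (pvStream_reset il rest hrest k true).trans (by simp)
  | cons c cs ih =>
    intro k rest hrest
    have hc : c ≠ '\n' := fun h' => h (h' ▸ List.mem_cons_self)
    have hcm : '\n' ∉ cs := fun hm => h (List.mem_cons_of_mem c hm)
    simp only [List.cons_append, pvStream, if_neg hc]
    by_cases hlt : (k : Int) < il
    · by_cases hws : c = ' ' ∨ c = '\t'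
      · rw [if_pos ⟨trivial, hws, hlt⟩]
        rw [ih hcm (k + 1) rest hrest]
        have hstrip : pvStripLoop (c :: cs) il k = pvStripLoop cs il (k + 1) := by
          conv_lhs => rw [pvStripLoop]
          rw [if_neg (by omega), if_pos hws]
        have hle : k + 1 ≤ pvStripLoop cs il (k + 1) := pvStripLoop_le il cs (k + 1)
        rw [hstrip]
        have : pvStripLoop cs il (k + 1) - k = (pvStripLoop cs il (k + 1) - (k + 1)) + 1 := by omega
        rw [this]
        simp
      · rw [if_neg (by rintro ⟨_, hw, _⟩; exact hws hw)]
        have hstrip : pvStripLoop (c :: cs) il k = k := by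
          conv_lhs => rw [pvStripLoop]
          rw [if_neg (by omega), if_neg hws]
        rw [hstrip, Nat.sub_self, List.drop_zero, List.cons_append,
          pvStream_noskip il cs hcm k rest, pvStream_reset il rest hrest k false]
    · rw [if_neg (by rintro ⟨_, _, h3⟩; exact hlt h3)]
      have hstrip : pvStripLoop (c :: cs) il k = k := by
        conv_lhs => rw [pvStripLoop]
        rw [if_pos (by omega)]
      rw [hstrip, Nat.sub_self, List.drop_zero, List.cons_append,
        pvStream_noskip il cs hcm k rest, pvStream_reset il rest hrest k false]

theorem pvSplit_no_newline (cs : List Char) (h : '\n' ∉ cs) : pvSplit cs = [cs] := by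
  induction cs with
  | nil => rfl
  | cons c cs ih =>
    have hc : c ≠ '\n' := fun h' => h (h' ▸ List.mem_cons_self)
    have hcm : '\n' ∉ cs := fun hm => h (List.mem_cons_of_mem c hm)
    simp [pvSplit, hc, ih hcm]

theorem pvSplit_append_newline (line rest : List Char) (h : '\n' ∉ line) :
    pvSplit (line ++ '\n' :: rest) = line :: pvSplit rest := by
  induction line with
  | nil => simp [pvSplit]
  | cons c cs ih =>
    have hc : c ≠ '\n' := fun h' => h (h' ▸ List.mem_cons_self)
    have hcm : '\n' ∉ cs := fun hm => h (List.mem_cons_of_mem c hm)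
    simp [pvSplit, hc, ih hcm]

theorem pvMain (il : Int) : ∀ (cs : List Char),
    pvStream il cs 0 true =
      PySem.Chars.join ['\n'] ((pvSplit cs).map (fun l => l.drop (pvStripLoop l il 0))) := by
  intro cs
  induction hn : cs.length using Nat.strong_induction_on generalizing cs with
  | _ n ih =>
  subst hn
  have hdecomp : cs.takeWhile (· ≠ '\n') ++ cs.dropWhile (· ≠ '\n') = cs :=
    List.takeWhile_append_dropWhile
  have hline : '\n' ∉ cs.takeWhile (· ≠ '\n') := by
    intro hm
    have := List.mem_takeWhile_imp hm
    simp at this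
  cases hdrop : cs.dropWhile (· ≠ '\n') with
  | nil =>
    have hcs : cs = cs.takeWhile (· ≠ '\n') := by
      conv_lhs => rw [← hdecomp, hdrop]
      rw [List.append_nil]
    rw [pvSplit_no_newline cs (by rw [hcs]; exact hline), List.map_cons, List.map_nil,
      PySem.Chars.join_singleton]
    calc pvStream il cs 0 true
        = pvStream il (cs.takeWhile (· ≠ '\n') ++ []) 0 true := by
          rw [List.append_nil, ← hcs]
      _ = _ := by
          rw [pvStream_line il _ hline 0 [] (Or.inr rfl)]
          simp only [pvStream, List.append_nil, Nat.sub_zero]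
          rw [← hcs]
  | cons c cs' =>
    have hc : c = '\n' := by
      have h2 := List.head?_dropWhile_not (fun x => decide (x ≠ '\n')) cs
      rw [hdrop] at h2
      simp at h2
      exact h2
    subst hc
    have hcs : cs = cs.takeWhile (· ≠ '\n') ++ '\n' :: cs' := by
      conv_lhs => rw [← hdecomp, hdrop]
    have hlen : cs'.length < cs.length := by
      rw [hcs]; simp; omega
    rw [hcs, pvSplit_append_newline _ _ hline,
      pvStream_line il _ hline 0 ('\n' :: cs') (Or.inl rfl),
      pvStream_newline il '\n' cs' 0 true rfl,
      ih cs'.length hlen cs' rfl]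
    cases hps : (pvSplit cs').map (fun l => l.drop (pvStripLoop l il 0)) with
    | nil =>
      exact absurd (by simpa using hps) (pvSplit_ne_nil cs')
    | cons y t =>
      rw [List.map_cons, hps, PySem.Chars.join_cons_cons]
      simp

-- ===== VERDICT =====
set_option maxHeartbeats 1000000 in
theorem dedent_heredoc_py_spec : Claim_equal_dedent_heredoc_py := by
  intro content il _
  unfold Spec_dedent_heredoc_py dedent_heredoc_py dedent_heredoc_py_alt
  rw [pvMain il content.toList, ← splitOn_eq_pvSplit]
  simp only [PySem.Str.split?, PySem.Chars.split?, show ("\n" : String).toList = ['\n'] from rfl,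
    List.isEmpty_cons, Bool.false_eq_true, if_false, Option.map_some, Option.getD_some,
    PySem.List.foldl_append_singleton_eq_map, PySem.Str.join, List.map_map, List.nil_append]
  refine congrArg (fun x => String.ofList (PySem.Chars.join ['\n'] x)) (List.map_congr_left ?_)
  intro l _
  simp [Function.comp, PySem.Str.toList_slice, PySem.List.slice_from_natCast]
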